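-- pv_equiv track=rewrite | github.com/apmoore1/tdsa_augmentation | tdsa_augmentation/statistics/target_in_embedding_stats.py | cumulate_length_count
-- ===== SOURCE A (Python) =====
-- from collections import defaultdict
-- from typing import Dict, List
--
-- def cumulate_length_count(length_count: Dict[int, int], max_length: int
--                            ) -> Dict[str, int]:
--     '''
--     :param length_count: Keys are the length of the target in tokens and the
--                          values are the number of targets that have this
--                          length.
--     :param max_length: The maximum length of a target in tokens before they
--                        all merge into the same max length target bucket/key.
--     :returns: A dictionary of keys being the target token length and the value
--               being the number of target of said length. Given a max_length
--               argument the largest key value can be max length where anything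
--               bigger than this will be counted in this key's value.
--     '''
--     length_count = sorted(length_count.items(), key=lambda x: x[0])
--     if length_count[0][0] == 0:
--         raise ValueError('The lowest length cannot be zero')
--     temp_length_count = defaultdict(lambda: 0)
--     for length, count in length_count:
--         if length >= max_length:
--             temp_length_count[f'{max_length}+'] += count
--         else:
--             temp_length_count[f'{length}'] += count
--     return dict(temp_length_count)
-- ===== SOURCE B (Python) =====
-- def cumulate_length_count(length_count, max_length):
--     items = sorted(length_count.items(), key=lambda x: x[0])
--     if items[0][0] == 0:
--         raise ValueError('The lowest length cannot be zero')
--     # find the split point: first index whose length reaches max_length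
--     cut = len(items)
--     for i, (length, _) in enumerate(items):
--         if length >= max_length:
--             cut = i
--             break
--     result = {str(length): count for length, count in items[:cut]}
--     if cut < len(items):
--         result[f'{max_length}+'] = sum(count for _, count in items[cut:])
--     return result
-- ===== Notes on version B (the rewrite author's own statement) =====
-- stated objective: alternative
-- what changed: Instead of bucketing every entry into a defaultdict inside one if/else loop, B finds the single split index where lengths reach max_length in the sorted list, builds the under-max part directly as a dict comprehension over the prefix, and attaches one overflow key whose value is the sum of the suffix counts.
import Mathlib
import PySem

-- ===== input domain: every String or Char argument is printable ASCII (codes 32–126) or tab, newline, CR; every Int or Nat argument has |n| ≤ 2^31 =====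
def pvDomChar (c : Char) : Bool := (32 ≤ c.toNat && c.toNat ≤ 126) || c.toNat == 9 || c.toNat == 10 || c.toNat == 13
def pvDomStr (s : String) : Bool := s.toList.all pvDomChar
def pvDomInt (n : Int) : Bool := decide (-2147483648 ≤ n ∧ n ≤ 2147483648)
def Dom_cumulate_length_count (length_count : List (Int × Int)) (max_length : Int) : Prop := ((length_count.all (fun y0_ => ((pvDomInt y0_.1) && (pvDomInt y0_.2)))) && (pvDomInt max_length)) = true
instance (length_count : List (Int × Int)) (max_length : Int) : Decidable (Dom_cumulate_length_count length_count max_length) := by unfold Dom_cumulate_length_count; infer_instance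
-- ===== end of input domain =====

-- B replaces A's per-entry defaultdict bucketing loop by a single split point in the sorted
-- list: prefix entries become their own keys directly, the suffix is summed into one '+' key
-- (objective: alternative decomposition, same cost).

-- ===== PORT A =====
def cumulate_length_count (length_count : List (Int × Int)) (max_length : Int) : List (String × Int) :=
  let lc := PySem.List.sorted length_count (fun x => x.1)
  match PySem.List.pyGet? lc 0 with
  | none => []      -- length_count[0] raises IndexError on the empty dict: outside Pre_
  | some p0 =>
    if p0.1 = 0 then []   -- raise ValueError('The lowest length cannot be zero'): outside Pre_
    else
      (lc.foldl (fun d p =>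
          if p.1 ≥ max_length then
            -- f'{max_length}+' is exactly the chars of str(max_length) followed by '+'
            d.modify (String.ofList (PySem.Int.toChars max_length ++ ['+'])) 0 (fun v => v + p.2)
          else
            d.modify (PySem.Int.toStr p.1) 0 (fun v => v + p.2))
        PySem.Dict.empty).items

-- ===== PORT B =====
-- the 'enumerate … break' loop of Source B: index of the first entry whose length reaches max_length, else len(items)
def pvFindCut : List (Int × Int) → Int → Nat
  | [], _ => 0
  | p :: t, m => if p.1 ≥ m then 0 else pvFindCut t m + 1

def cumulate_length_count_alt (length_count : List (Int × Int)) (max_length : Int) : List (String × Int) :=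
  let items := PySem.List.sorted length_count (fun x => x.1)
  match PySem.List.pyGet? items 0 with
  | none => []      -- items[0] raises IndexError on the empty dict: outside Pre_
  | some p0 =>
    if p0.1 = 0 then []   -- raise ValueError: outside Pre_
    else
      let cut := pvFindCut items max_length
      -- items[:cut] with 0 ≤ cut ≤ len(items) is exactly List.take cut; items[cut:] is List.drop cut
      let result := PySem.Dict.ofList ((items.take cut).map (fun p => (PySem.Int.toStr p.1, p.2)))
      let result2 :=
        if cut < items.length then
          result.insert (String.ofList (PySem.Int.toChars max_length ++ ['+']))
            (((items.drop cut).map (fun p => p.2)).sum)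
        else result
      result2.items

-- ===== PRECONDITION & SPEC =====
-- Pre_ excludes: the empty dict (A raises IndexError), inputs whose minimum length is 0 (A raises
-- ValueError), and association lists with duplicate keys (not representable as a Python dict).
def Pre_cumulate_length_count (length_count : List (Int × Int)) (max_length : Int) : Prop :=
  length_count ≠ [] ∧ (length_count.map Prod.fst).Nodup ∧
    ((∀ p ∈ length_count, p.1 ≠ 0) ∨ (∃ p ∈ length_count, p.1 < 0))
instance (length_count : List (Int × Int)) (max_length : Int) : Decidable (Pre_cumulate_length_count length_count max_length) := by unfold Pre_cumulate_length_count; infer_instance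

def pvWitness_cumulate_length_count : (List (Int × Int)) × Int := ([(1, 2), (3, 4)], 2)

def Spec_cumulate_length_count (length_count : List (Int × Int)) (max_length : Int) (out : List (String × Int)) : Prop := out = cumulate_length_count_alt length_count max_length
instance (length_count : List (Int × Int)) (max_length : Int) (out : List (String × Int)) : Decidable (Spec_cumulate_length_count length_count max_length out) := by unfold Spec_cumulate_length_count; infer_instance

-- ===== CLAIM (what is proved, stated in full; the proofs are below) =====
def Claim_equal_cumulate_length_count : Prop := ∀ (length_count : List (Int × Int)) (max_length : Int), Dom_cumulate_length_count length_count max_length → Pre_cumulate_length_count length_count max_length → Spec_cumulate_length_count length_count max_length (cumulate_length_count length_count max_length)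

-- ===== LEMMAS AND PROOFS =====

-- decimal digit characters
theorem pv_digitChar_toNat (d : Nat) (h : d < 10) : (Nat.digitChar d).toNat = 48 + d := by
  interval_cases d <;> rfl

theorem pv_toDigitsCore_step (f n : Nat) (ds : List Char) :
    Nat.toDigitsCore 10 (f + 1) n ds =
      if n / 10 = 0 then (n % 10).digitChar :: ds
      else Nat.toDigitsCore 10 f (n / 10) ((n % 10).digitChar :: ds) := rfl

theorem pv_toDigitsCore_append (f : Nat) : ∀ (n : Nat) (ds : List Char),
    Nat.toDigitsCore 10 f n ds = Nat.toDigitsCore 10 f n [] ++ ds := by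
  induction f with
  | zero => intro n ds; simp [Nat.toDigitsCore]
  | succ f ih =>
    intro n ds
    rw [pv_toDigitsCore_step, pv_toDigitsCore_step f n []]
    by_cases h : n / 10 = 0
    · simp [h]
    · simp only [h, if_false]
      rw [ih (n / 10) ((n % 10).digitChar :: ds), ih (n / 10) [(n % 10).digitChar]]
      simp

theorem pv_mem_toDigits (f : Nat) : ∀ (n : Nat) (c : Char), c ∈ Nat.toDigitsCore 10 f n [] →
    48 ≤ c.toNat ∧ c.toNat ≤ 57 := by
  induction f with
  | zero => intro n c hc; simp [Nat.toDigitsCore] at hc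
  | succ f ih =>
    intro n c hc
    rw [pv_toDigitsCore_step] at hc
    by_cases h : n / 10 = 0
    · simp only [h, if_true] at hc
      simp only [List.mem_singleton] at hc
      subst hc
      rw [pv_digitChar_toNat _ (Nat.mod_lt _ (by norm_num))]
      omega
    · simp only [h, if_false] at hc
      rw [pv_toDigitsCore_append] at hc
      rcases List.mem_append.mp hc with h1 | h2
      · exact ih _ _ h1
      · simp only [List.mem_singleton] at h2
        subst h2
        rw [pv_digitChar_toNat _ (Nat.mod_lt _ (by norm_num))]
        omega

-- decode: reading the digit string back
def pvVal (cs : List Char) : Nat := cs.foldl (fun a c => 10 * a + (c.toNat - 48)) 0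

theorem pv_val_toDigitsCore (f : Nat) : ∀ (n : Nat), n ≤ f →
    pvVal (Nat.toDigitsCore 10 (f + 1) n []) = n := by
  induction f with
  | zero =>
    intro n hn
    interval_cases n
    rfl
  | succ f ih =>
    intro n hn
    rw [pv_toDigitsCore_step]
    by_cases h : n / 10 = 0
    · simp only [h, if_true]
      have h10 : n < 10 := by omega
      simp only [pvVal, List.foldl]
      rw [pv_digitChar_toNat _ (Nat.mod_lt _ (by norm_num))]
      omega
    · simp only [h, if_false]
      rw [pv_toDigitsCore_append]
      have hle : n / 10 ≤ f := by omega
      have := ih (n / 10) hle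
      simp only [pvVal] at this ⊢
      rw [List.foldl_append, this]
      simp only [List.foldl]
      rw [pv_digitChar_toNat _ (Nat.mod_lt _ (by norm_num))]
      omega

theorem pv_toDigits_inj {a b : Nat} (h : Nat.toDigits 10 a = Nat.toDigits 10 b) : a = b := by
  have ha := pv_val_toDigitsCore a a le_rfl
  have hb := pv_val_toDigitsCore b b le_rfl
  unfold Nat.toDigits at h
  rw [h] at ha
  rw [hb] at ha
  omega

theorem pv_mem_toChars (n : Int) (c : Char) (hc : c ∈ PySem.Int.toChars n) :
    c.toNat = 45 ∨ (48 ≤ c.toNat ∧ c.toNat ≤ 57) := by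
  unfold PySem.Int.toChars at hc
  split at hc
  · rcases List.mem_cons.mp hc with h | h
    · subst h; left; rfl
    · exact Or.inr (pv_mem_toDigits _ _ _ h)
  · exact Or.inr (pv_mem_toDigits _ _ _ hc)

theorem pv_toChars_inj {a b : Int} (h : PySem.Int.toChars a = PySem.Int.toChars b) : a = b := by
  unfold PySem.Int.toChars at h
  split at h <;> split at h
  · -- both negative
    rename_i ha hb
    simp only [List.cons.injEq] at h
    have := pv_toDigits_inj h.2
    omega
  · -- a < 0, 0 ≤ b: '-' would be a digit of b
    rename_i ha hb
    exfalso
    have : '-' ∈ Nat.toDigits 10 b.toNat := by rw [← h]; exact List.mem_cons_self ..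
    have := pv_mem_toDigits _ _ _ this
    simp [Char.toNat] at this
  · rename_i ha hb
    exfalso
    have : '-' ∈ Nat.toDigits 10 a.toNat := by rw [h]; exact List.mem_cons_self ..
    have := pv_mem_toDigits _ _ _ this
    simp [Char.toNat] at this
  · rename_i ha hb
    have := pv_toDigits_inj h
    omega

theorem pv_toStr_inj : Function.Injective PySem.Int.toStr := by
  intro a b h
  have : (PySem.Int.toStr a).toList = (PySem.Int.toStr b).toList := by rw [h]
  rw [PySem.Int.toList_toStr, PySem.Int.toList_toStr] at this
  exact pv_toChars_inj this

theorem pv_plus_ne (a m : Int) :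
    PySem.Int.toStr a ≠ String.ofList (PySem.Int.toChars m ++ ['+']) := by
  intro h
  have : (PySem.Int.toStr a).toList = (String.ofList (PySem.Int.toChars m ++ ['+'])).toList := by rw [h]
  rw [PySem.Int.toList_toStr, String.toList_ofList] at this
  have hmem : '+' ∈ PySem.Int.toChars a := by rw [this]; simp
  have := pv_mem_toChars a '+' hmem
  simp [Char.toNat] at this

-- Dict helpers
theorem pv_insert_insert_self {κ ν : Type} [BEq κ] [LawfulBEq κ] (d : PySem.Dict κ ν) (k : κ) (v w : ν) :
    (d.insert k v).insert k w = d.insert k w := by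
  apply PySem.Dict.ext
  by_cases h : d.contains k
  · rw [PySem.Dict.items_insert_of_contains _ _ (PySem.Dict.contains_insert_self d k v),
        PySem.Dict.items_insert_of_contains _ _ h, PySem.Dict.items_insert_of_contains _ _ h,
        List.map_map]
    apply List.map_congr_left
    intro p _
    by_cases hp : (p.1 == k) = true <;> simp [Function.comp, hp]
  · have hfalse : d.contains k = false := by simpa using h
    rw [PySem.Dict.items_insert_of_contains _ _ (PySem.Dict.contains_insert_self d k v),
        PySem.Dict.items_insert_of_not_contains _ _ hfalse,
        PySem.Dict.items_insert_of_not_contains _ _ hfalse]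
    simp only [PySem.Dict.contains, List.any_eq_false] at hfalse
    rw [List.map_append]
    congr 1
    · conv_rhs => rw [← List.map_id d.items]
      apply List.map_congr_left
      intro p hp
      simp [hfalse p hp]
    · simp

theorem pv_modify_modify {κ : Type} [BEq κ] [LawfulBEq κ] (d : PySem.Dict κ Int) (k : κ) (a b : Int) :
    (d.modify k 0 (fun v => v + a)).modify k 0 (fun v => v + b) = d.modify k 0 (fun v => v + (a + b)) := by
  simp only [PySem.Dict.modify, PySem.Dict.getD_insert_self, pv_insert_insert_self, add_assoc]

theorem pv_fold_high {κ : Type} [BEq κ] [LawfulBEq κ] (l : List (Int × Int)) (k : κ) :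
    ∀ (d : PySem.Dict κ Int), l ≠ [] →
    l.foldl (fun d p => d.modify k 0 (fun v => v + p.2)) d
      = d.modify k 0 (fun v => v + (l.map (fun p => p.2)).sum) := by
  induction l with
  | nil => intro d hl; exact absurd rfl hl
  | cons p t ih =>
    intro d _
    by_cases ht : t = []
    · subst ht; simp
    · simp only [List.foldl_cons]
      rw [ih _ ht, pv_modify_modify]
      simp

theorem pv_modify_fresh' {κ ν : Type} [BEq κ] [LawfulBEq κ] [AddZeroClass ν] (d : PySem.Dict κ ν) (k : κ) (c : ν)
    (h : d.contains k = false) : d.modify k 0 (fun v => v + c) = d.insert k c := by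
  rw [PySem.Dict.modify, PySem.Dict.getD_of_not_contains d 0 h]
  simp

theorem pv_fold_low (low : List (Int × Int)) :
    ∀ (d : PySem.Dict String Int),
    (∀ p ∈ low, d.contains (PySem.Int.toStr p.1) = false) →
    ((low.map (fun p => PySem.Int.toStr p.1)).Nodup) →
    low.foldl (fun d p => d.modify (PySem.Int.toStr p.1) 0 (fun v => v + p.2)) d
      = low.foldl (fun d p => d.insert (PySem.Int.toStr p.1) p.2) d := by
  induction low with
  | nil => intro d _ _; rfl
  | cons p t ih =>
    intro d hfresh hnodup
    simp only [List.foldl_cons]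
    rw [pv_modify_fresh' _ _ _ (hfresh p (List.mem_cons_self))]
    simp only [List.map_cons, List.nodup_cons, List.mem_map] at hnodup
    apply ih
    · intro q hq
      rw [PySem.Dict.contains_insert]
      have h1 : (PySem.Int.toStr q.1 == PySem.Int.toStr p.1) = false := by
        simp only [beq_eq_false_iff_ne, ne_eq]
        intro e
        exact hnodup.1 ⟨q, hq, e⟩
      rw [h1, hfresh q (List.mem_cons_of_mem p hq)]
      rfl
    · exact hnodup.2

-- split-point facts
theorem pv_take_lt (s : List (Int × Int)) (m : Int) :
    ∀ p ∈ s.take (pvFindCut s m), p.1 < m := by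
  induction s with
  | nil => simp
  | cons q t ih =>
    simp only [pvFindCut]
    split
    · simp
    · rename_i h
      intro p hp
      rcases List.mem_cons.mp (by simpa using hp) with h1 | h1
      · subst h1; omega
      · exact ih p h1

theorem pv_drop_ge (s : List (Int × Int)) (m : Int) (hs : s.Pairwise (fun a b => a.1 < b.1)) :
    ∀ p ∈ s.drop (pvFindCut s m), m ≤ p.1 := by
  induction s with
  | nil => simp
  | cons q t ih =>
    simp only [pvFindCut]
    rcases List.pairwise_cons.mp hs with ⟨hq, ht⟩
    split
    · rename_i h
      intro p hp
      rcases List.mem_cons.mp (by simpa using hp) with h1 | h1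
      · subst h1; omega
      · have := hq p h1; omega
    · simpa using ih ht

-- main theorem body
theorem pv_core (s : List (Int × Int)) (m : Int)
    (hnods : (s.map Prod.fst).Nodup)
    (hpair : s.Pairwise (fun a b => a.1 < b.1)) :
    (s.foldl (fun d p =>
        if p.1 ≥ m then
          d.modify (String.ofList (PySem.Int.toChars m ++ ['+'])) 0 (fun v => v + p.2)
        else
          d.modify (PySem.Int.toStr p.1) 0 (fun v => v + p.2)) PySem.Dict.empty).items
    = (if pvFindCut s m < s.length then
        (PySem.Dict.ofList ((s.take (pvFindCut s m)).map (fun p => (PySem.Int.toStr p.1, p.2)))).insert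
          (String.ofList (PySem.Int.toChars m ++ ['+']))
          (((s.drop (pvFindCut s m)).map (fun p => p.2)).sum)
      else
        PySem.Dict.ofList ((s.take (pvFindCut s m)).map (fun p => (PySem.Int.toStr p.1, p.2)))).items := by
  have hnodlow : ((s.take (pvFindCut s m)).map (fun p => PySem.Int.toStr p.1)).Nodup := by
    have h1 : ((s.take (pvFindCut s m)).map Prod.fst).Nodup := by
      rw [List.map_take]
      exact (List.take_sublist _ _).nodup hnods
    have := h1.map pv_toStr_inj
    simpa [List.map_map, Function.comp_def] using this
  have hL : ((s.take (pvFindCut s m)).map (fun p => (PySem.Int.toStr p.1, p.2))).map Prod.fst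
      = (s.take (pvFindCut s m)).map (fun p => PySem.Int.toStr p.1) := by
    simp [List.map_map, Function.comp_def]
  -- items of the low-part insert fold / of Dict.ofList
  have hitems1 : ((s.take (pvFindCut s m)).foldl
      (fun d p => d.insert (PySem.Int.toStr p.1) p.2) PySem.Dict.empty).items
      = (s.take (pvFindCut s m)).map (fun p => (PySem.Int.toStr p.1, p.2)) := by
    simpa using PySem.Dict.items_foldl_insert_fresh (s.take (pvFindCut s m))
      (fun p => PySem.Int.toStr p.1) (fun p => p.2) PySem.Dict.empty
      (fun a _ => PySem.Dict.contains_empty _) hnodlow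
  have hofitems : (PySem.Dict.ofList
      ((s.take (pvFindCut s m)).map (fun p => (PySem.Int.toStr p.1, p.2)))).items
      = (s.take (pvFindCut s m)).map (fun p => (PySem.Int.toStr p.1, p.2)) := by
    rw [PySem.Dict.ofList, PySem.Dict.update]
    rw [PySem.Dict.items_foldl_insert_fresh _ Prod.fst Prod.snd PySem.Dict.empty
      (fun a _ => PySem.Dict.contains_empty _) (hL ▸ hnodlow)]
    simp [Function.comp_def, PySem.Dict.empty]
  have hfreshL : ∀ (xs : List (String × Int)),
      xs = (s.take (pvFindCut s m)).map (fun p => (PySem.Int.toStr p.1, p.2)) →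
      xs.any (fun p => p.1 == String.ofList (PySem.Int.toChars m ++ ['+'])) = false := by
    intro xs hxs
    subst hxs
    rw [List.any_eq_false]
    intro x hx
    rcases List.mem_map.mp hx with ⟨p, _, hp⟩
    subst hp
    simp only [beq_eq_false_iff_ne, ne_eq, Bool.not_eq_true]
    exact fun e => pv_plus_ne p.1 m (by simpa using e)
  -- split the fold of A at the cut point
  conv_lhs => rw [← List.take_append_drop (pvFindCut s m) s]
  rw [List.foldl_append]
  rw [PySem.List.foldl_congr_mem (s.take (pvFindCut s m)) _
      (fun d p => d.modify (PySem.Int.toStr p.1) 0 (fun v => v + p.2)) _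
      (fun acc x hx => by rw [if_neg (not_le.mpr (pv_take_lt s m x hx))])]
  rw [pv_fold_low _ _ (fun p _ => PySem.Dict.contains_empty _) hnodlow]
  have hplus1 : ((s.take (pvFindCut s m)).foldl
      (fun d p => d.insert (PySem.Int.toStr p.1) p.2) PySem.Dict.empty).contains
      (String.ofList (PySem.Int.toChars m ++ ['+'])) = false := by
    rw [PySem.Dict.contains, hitems1]
    exact hfreshL _ rfl
  by_cases hlt : pvFindCut s m < s.length
  · have hhighne : s.drop (pvFindCut s m) ≠ [] := by
      rw [ne_eq, List.drop_eq_nil_iff]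
      omega
    rw [if_pos hlt]
    rw [PySem.List.foldl_congr_mem (s.drop (pvFindCut s m)) _
        (fun d p => d.modify (String.ofList (PySem.Int.toChars m ++ ['+'])) 0 (fun v => v + p.2)) _
        (fun acc x hx => by rw [if_pos (pv_drop_ge s m hpair x hx)])]
    rw [pv_fold_high _ _ _ hhighne, pv_modify_fresh' _ _ _ hplus1,
        PySem.Dict.items_insert_of_not_contains _ _ hplus1, hitems1]
    have hplus2 : (PySem.Dict.ofList
        ((s.take (pvFindCut s m)).map (fun p => (PySem.Int.toStr p.1, p.2)))).contains
        (String.ofList (PySem.Int.toChars m ++ ['+'])) = false := by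
      rw [PySem.Dict.contains, hofitems]
      exact hfreshL _ rfl
    rw [PySem.Dict.items_insert_of_not_contains _ _ hplus2, hofitems]
  · rw [if_neg hlt]
    have hhigh : s.drop (pvFindCut s m) = [] := by
      rw [List.drop_eq_nil_iff]
      omega
    rw [hhigh, List.foldl_nil, hitems1, hofitems]

theorem pv_main (length_count : List (Int × Int)) (max_length : Int)
    (h : Pre_cumulate_length_count length_count max_length) :
    cumulate_length_count length_count max_length
      = cumulate_length_count_alt length_count max_length := by
  obtain ⟨hne, hnodup, hzero⟩ := h
  have hsne : PySem.List.sorted length_count (fun x => x.1) ≠ [] := by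
    simpa [PySem.List.sorted_eq_nil_iff] using hne
  obtain ⟨p0, t, hs⟩ := List.exists_cons_of_ne_nil hsne
  have hmin := PySem.List.key_head_sorted_le length_count (fun x => x.1) hs
  have hp0mem : p0 ∈ length_count := by
    rw [← PySem.List.mem_sorted (key := fun x => x.1) (rev := false), hs]
    exact List.mem_cons_self
  have hp0 : p0.1 ≠ 0 := by
    rcases hzero with hall | ⟨q, hq, hqneg⟩
    · exact hall p0 hp0mem
    · have h2 : p0.1 ≤ q.1 := hmin q hq
      omega
  have hperm : (p0 :: t).Perm length_count := hs ▸ PySem.List.sorted_perm length_count (fun x => x.1) false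
  have hnods : ((p0 :: t).map Prod.fst).Nodup := ((hperm.map Prod.fst).nodup_iff).mpr hnodup
  have hle : (p0 :: t).Pairwise (fun a b => a.1 ≤ b.1) :=
    hs ▸ PySem.List.sorted_pairwise length_count (fun x => x.1)
  have hpair : (p0 :: t).Pairwise (fun a b => a.1 < b.1) :=
    (hle.and (List.pairwise_map.mp hnods)).imp (fun hab => lt_of_le_of_ne hab.1 hab.2)
  simp only [cumulate_length_count, cumulate_length_count_alt, hs, PySem.List.pyGet?_zero_cons]
  rw [if_neg hp0, if_neg hp0]
  exact pv_core (p0 :: t) max_length hnods hpair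

-- ===== VERDICT (by name: the statement is the Claim_ definition above) =====
theorem cumulate_length_count_spec : Claim_equal_cumulate_length_count := by
  intro lc m _ hpre
  unfold Spec_cumulate_length_count
  exact pv_main lc m hpre
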